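-- pv_equiv track=rewrite | github.com/s3891667/Mycrypt | test.py | mys
-- ===== SOURCE A (Python) =====
-- def mys(A, l, u, k):
--     if(l == u):
--         if(A[l] == k):
--             return 1
--         else:
--             return 0
--     else:
--         m = int((l+u-1)/2)
--         return mys(A, l, m, k) + mys(A, m+1, u, k)
-- ===== SOURCE B (Python) =====
-- def mys(A, l, u, k):
--     # inclusive range = its first element plus the half-open rest
--     # (the range is non-empty, as the original assumes)
--     return int(A[l] == k) + sum(A[i] == k for i in range(l + 1, u + 1))
-- ===== Notes on version B (the rewrite author's own statement) =====
-- stated objective: simpler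
-- what changed: Replaced the binary divide-and-conquer recursion (midpoint split, two recursive calls per node) with a one-line indicator sum: the first element of the inclusive range plus sum(A[i] == k for i in range(l+1, u+1)).
import Mathlib
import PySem

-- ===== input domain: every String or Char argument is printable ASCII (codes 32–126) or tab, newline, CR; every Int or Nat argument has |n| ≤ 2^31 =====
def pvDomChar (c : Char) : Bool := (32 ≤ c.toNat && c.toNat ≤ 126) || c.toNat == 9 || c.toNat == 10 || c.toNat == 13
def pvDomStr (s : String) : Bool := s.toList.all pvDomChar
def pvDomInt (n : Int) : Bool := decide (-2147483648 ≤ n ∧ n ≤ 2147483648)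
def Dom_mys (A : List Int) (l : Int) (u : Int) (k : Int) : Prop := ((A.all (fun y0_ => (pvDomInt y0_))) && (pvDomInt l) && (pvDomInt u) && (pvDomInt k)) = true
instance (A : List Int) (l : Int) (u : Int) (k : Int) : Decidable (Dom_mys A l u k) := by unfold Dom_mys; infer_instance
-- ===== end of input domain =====

-- B replaces A's binary divide-and-conquer recursion by a head-plus-rest indicator sum over the inclusive range l..u; equal on Pre_ (l ≤ u, all indices in range); simpler, same O(u-l) cost.


-- ===== PORT A =====

-- ===== PORT A =====
-- Python's m = int((l+u-1)/2) truncates toward zero: Int.tdiv (exact on Dom: |l+u-1| < 2^33 ≪ 2^53, so the float division is exact).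
-- A[l] is total only inside Pre_ (index in range); pyGetD's default is never used there.
-- fuel = (u - l).toNat is a totality device only: each recursive call shrinks
-- u - l (pvMid_bounds below), so the 0-fuel branch is never reached from mys;
-- the final 'else 0' (l > u) is where the Python recurses forever (excluded by Pre_).
def mysGo (A : List Int) (k : Int) : Nat → Int → Int → Int
  | fuel, l, u =>
    if l = u then
      if PySem.List.pyGetD A l 0 = k then 1 else 0
    else if l < u then
      match fuel with
      | 0 => 0
      | fuel' + 1 =>
        let m := (l + u - 1).tdiv 2
        mysGo A k fuel' l m + mysGo A k fuel' (m + 1) u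
    else 0

def mys (A : List Int) (l : Int) (u : Int) (k : Int) : Int :=
  mysGo A k (u - l).toNat l u

-- ===== PORT B =====
-- Source B: int(A[l] == k) + sum(A[i] == k for i in range(l+1, u+1)) — first element
-- of the inclusive range, plus the 0/1 indicator summed over the half-open rest.
-- A[l]/A[i] are total only inside Pre_ (index in range); pyGetD's default is never used there.
def mys_alt (A : List Int) (l : Int) (u : Int) (k : Int) : Int :=
  (if PySem.List.pyGetD A l 0 = k then (1 : Int) else 0) +
    ((PySem.List.pyRange (l + 1) (u + 1) 1).map
      (fun i => if PySem.List.pyGetD A i 0 = k then (1 : Int) else 0)).sum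

-- ===== PRECONDITION & SPEC =====
-- Pre_: exactly where the Python A returns: l ≤ u (otherwise A recurses forever → RecursionError)
-- and every visited index l..u is a valid Python index of A (otherwise IndexError).
def Pre_mys (A : List Int) (l : Int) (u : Int) (k : Int) : Prop :=
  l ≤ u ∧ -(A.length : Int) ≤ l ∧ u < (A.length : Int)
instance (A : List Int) (l : Int) (u : Int) (k : Int) : Decidable (Pre_mys A l u k) := by unfold Pre_mys; infer_instance
def pvWitness_mys : List Int × Int × Int × Int := ([1, 2, 1, 3], 0, 3, 1)

def Spec_mys (A : List Int) (l : Int) (u : Int) (k : Int) (out : Int) : Prop := out = mys_alt A l u k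
instance (A : List Int) (l : Int) (u : Int) (k : Int) (out : Int) : Decidable (Spec_mys A l u k out) := by unfold Spec_mys; infer_instance

-- ===== CLAIM (what is proved, stated in full; the proofs are below) =====
def Claim_equal_mys : Prop := ∀ (A : List Int) (l : Int) (u : Int) (k : Int), Dom_mys A l u k → Pre_mys A l u k → Spec_mys A l u k (mys A l u k)

-- ===== LEMMAS AND PROOFS =====

-- the truncating midpoint lies strictly inside [l, u) when l < u
theorem pvMid_bounds (l u : Int) (h : l < u) : l ≤ (l + u - 1).tdiv 2 ∧ (l + u - 1).tdiv 2 < u := by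
  by_cases h0 : 0 ≤ l + u - 1
  · rw [Int.tdiv_eq_ediv_of_nonneg h0]; omega
  · have h1 : (-(-(l + u - 1))).tdiv 2 = -((-(l + u - 1)).tdiv 2) := Int.neg_tdiv _ 2
    rw [neg_neg] at h1
    rw [h1, Int.tdiv_eq_ediv_of_nonneg (by omega : (0:Int) ≤ -(l + u - 1))]
    omega

-- B's head-plus-rest split equals the indicator sum over the full inclusive range
theorem mys_alt_eq_sum (A : List Int) (l u k : Int) (hle : l ≤ u) :
    mys_alt A l u k =
      ((PySem.List.pyRange l (u + 1) 1).map
        (fun i => if PySem.List.pyGetD A i 0 = k then (1 : Int) else 0)).sum := by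
  unfold mys_alt
  rw [PySem.List.pyRange_one_cons (by omega : l < u + 1)]
  simp

-- A's divide-and-conquer computes exactly the full-range indicator sum (enough fuel given)
theorem mysGo_eq_sum (A : List Int) (k : Int) (fuel : Nat) :
    ∀ (l u : Int), l ≤ u → (u - l).toNat ≤ fuel →
      mysGo A k fuel l u =
        ((PySem.List.pyRange l (u + 1) 1).map
          (fun i => if PySem.List.pyGetD A i 0 = k then (1 : Int) else 0)).sum := by
  induction fuel with
  | zero =>
    intro l u hle hf
    have : l = u := by omega
    subst this
    rw [mysGo]
    simp [PySem.List.pyRange_one_singleton]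
  | succ f ih =>
    intro l u hle hf
    rcases eq_or_lt_of_le hle with heq | hlt
    · subst heq
      rw [mysGo]
      simp [PySem.List.pyRange_one_singleton]
    · have hm := pvMid_bounds l u hlt
      rw [mysGo]
      simp only [if_neg (by omega : ¬ l = u), if_pos hlt]
      rw [ih l _ (by omega) (by omega), ih _ u (by omega) (by omega)]
      rw [PySem.List.pyRange_one_append l ((l + u - 1).tdiv 2 + 1) (u + 1) (by omega) (by omega)]
      rw [List.map_append, List.sum_append]

-- ===== VERDICT (by name: the statement is the Claim_ definition above) =====
theorem mys_spec : Claim_equal_mys := by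
  intro A l u k _ hpre
  unfold Spec_mys mys
  rw [mysGo_eq_sum A k (u - l).toNat l u hpre.1 le_rfl, mys_alt_eq_sum A l u k hpre.1]
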